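-- pv_equiv track=rewrite | github.com/Vergil0327/leetcode-history | Segment Tree/3901. Good Subsequence Queries/solution.py | can_drop_one
-- ===== SOURCE A (Python) =====
-- import math
--
-- def can_drop_one(nums, n, p):
--     for i in range(n):
--         current_gcd = 0
--         for j in range(n):
--             if i == j: continue
--             current_gcd = math.gcd(current_gcd, nums[j])
--         if current_gcd == p:
--             return True
--     return False
-- ===== SOURCE B (Python) =====
-- import math
--
-- def can_drop_one(nums, n, p):
--     suf = [0] * (n + 1)
--     for j in range(n - 1, -1, -1):
--         suf[j] = math.gcd(suf[j + 1], nums[j])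
--     pre = 0
--     for i in range(n):
--         if math.gcd(pre, suf[i + 1]) == p:
--             return True
--         pre = math.gcd(pre, nums[i])
--     return False
-- ===== Notes on version B (the rewrite author's own statement) =====
-- stated objective: faster
-- what changed: Replace the O(n^2) double loop (recomputing the gcd of all-but-one from scratch for every excluded index) by a suffix-gcd array plus a running prefix gcd, combining them in O(1) per excluded index.
-- outside the precondition, e.g. on can_drop_one([], 1, 0): A returns True, B raises IndexError
import Mathlib
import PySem

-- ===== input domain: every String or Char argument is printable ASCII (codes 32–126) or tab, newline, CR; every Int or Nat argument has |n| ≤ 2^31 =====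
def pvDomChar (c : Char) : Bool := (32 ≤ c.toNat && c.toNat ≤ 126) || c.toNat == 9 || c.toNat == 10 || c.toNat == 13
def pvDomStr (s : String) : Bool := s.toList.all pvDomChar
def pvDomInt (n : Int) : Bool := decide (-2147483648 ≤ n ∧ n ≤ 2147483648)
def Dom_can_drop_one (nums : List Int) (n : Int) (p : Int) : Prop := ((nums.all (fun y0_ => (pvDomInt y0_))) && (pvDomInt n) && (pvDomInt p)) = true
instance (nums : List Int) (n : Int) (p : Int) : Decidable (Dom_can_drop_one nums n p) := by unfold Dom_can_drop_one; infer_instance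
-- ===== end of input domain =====

-- B replaces A's O(n^2) recompute-gcd-per-excluded-index double loop by a suffix-gcd array plus a running prefix gcd combined in O(1) per index (asymptotically faster).


-- math.gcd on Int: nonnegative gcd of absolute values (exact for Python's math.gcd)
def gcdI (a b : Int) : Int := (Int.gcd a b : Int)

-- ===== PORT A =====
-- for i in range(n): inner loop over j in range(n) skipping i, gcd-accumulating nums[j]; return True on first hit
def can_drop_one (nums : List Int) (n : Int) (p : Int) : Bool :=
  (PySem.List.pyRange 0 n 1).any (fun i =>
    ((PySem.List.pyRange 0 n 1).foldl
      (fun g j => if i == j then g else gcdI g (PySem.List.pyGetD nums j 0)) 0) == p)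

-- ===== PORT B =====
-- Source B's second loop: for i in range(n): test gcd(pre, suf[i+1]) == p, else pre = gcd(pre, nums[i]); early return via recursion
def altScan (nums suf : List Int) (p : Int) : Int → List Int → Bool
  | _, [] => false
  | pre, i :: is =>
    if gcdI pre (PySem.List.pyGetD suf (i + 1) 0) == p then true
    else altScan nums suf p (gcdI pre (PySem.List.pyGetD nums i 0)) is

-- Source B: suf filled back-to-front by `for j in range(n-1, -1, -1): suf[j] = gcd(suf[j+1], nums[j])`;
-- the in-place fill from the right is rendered by prepending each new suf[j] (the list head is suf[j+1])
def can_drop_one_alt (nums : List Int) (n : Int) (p : Int) : Bool :=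
  let suf := (PySem.List.pyRange (n - 1) (-1) (-1)).foldl
      (fun acc j => gcdI (acc.headD 0) (PySem.List.pyGetD nums j 0) :: acc) [0]
  altScan nums suf p 0 (PySem.List.pyRange 0 n 1)

-- ===== PRECONDITION & SPEC =====
-- Pre_ excludes n > len(nums): there both programs index out of range and raise IndexError, except the
-- degenerate call n = 1 on an empty list, where A skips its only index (j == i) and accidentally returns
-- (p == 0) while B's natural scan still raises IndexError.
def Pre_can_drop_one (nums : List Int) (n : Int) (p : Int) : Prop := n ≤ (nums.length : Int)
instance (nums : List Int) (n : Int) (p : Int) : Decidable (Pre_can_drop_one nums n p) := by unfold Pre_can_drop_one; infer_instance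
def pvWitness_can_drop_one : List Int × Int × Int := ([6, 10, 15], 3, 2)

def Spec_can_drop_one (nums : List Int) (n : Int) (p : Int) (out : Bool) : Prop := out = can_drop_one_alt nums n p
instance (nums : List Int) (n : Int) (p : Int) (out : Bool) : Decidable (Spec_can_drop_one nums n p out) := by unfold Spec_can_drop_one; infer_instance

-- ===== CLAIM (what is proved, stated in full; the proofs are below) =====
def Claim_equal_can_drop_one : Prop := ∀ (nums : List Int) (n : Int) (p : Int), Dom_can_drop_one nums n p → Pre_can_drop_one nums n p → Spec_can_drop_one nums n p (can_drop_one nums n p)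

-- ===== LEMMAS AND PROOFS =====

-- suffix gcd in A's accumulation order: R (x :: xs) = gcd(R xs, x)
def R : List Int → Int
  | [] => 0
  | x :: xs => gcdI (R xs) x

-- the fully built suffix list [R (xs.drop 0), R (xs.drop 1), …, 0]
def sufGcds (xs : List Int) : List Int :=
  xs.foldr (fun x acc => gcdI (acc.headD 0) x :: acc) [0]

lemma gcdI_nonneg (a b : Int) : 0 ≤ gcdI a b := by
  simp [gcdI]

lemma gcdI_comm (a b : Int) : gcdI a b = gcdI b a := by
  simp [gcdI, Int.gcd, Nat.gcd_comm]

lemma gcdI_assoc (a b c : Int) : gcdI (gcdI a b) c = gcdI a (gcdI b c) := by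
  simp [gcdI, Int.gcd, Nat.gcd_assoc]

lemma gcdI_zero_right (a : Int) (h : 0 ≤ a) : gcdI a 0 = a := by
  simp [gcdI, Int.gcd]
  omega

lemma foldl_gcdI_nonneg (b : List Int) (g : Int) (h : 0 ≤ g) :
    0 ≤ List.foldl gcdI g b := by
  induction b generalizing g with
  | nil => simpa using h
  | cons x xs ih => simpa using ih (gcdI g x) (gcdI_nonneg g x)

lemma foldl_gcdI_eq_R (b : List Int) (g : Int) (h : 0 ≤ g) :
    List.foldl gcdI g b = gcdI g (R b) := by
  induction b generalizing g with
  | nil => simpa [R] using (gcdI_zero_right g h).symm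
  | cons x xs ih =>
    calc List.foldl gcdI g (x :: xs) = List.foldl gcdI (gcdI g x) xs := rfl
      _ = gcdI (gcdI g x) (R xs) := ih (gcdI g x) (gcdI_nonneg g x)
      _ = gcdI g (gcdI x (R xs)) := gcdI_assoc _ _ _
      _ = gcdI g (R (x :: xs)) := by rw [R, gcdI_comm (R xs) x]

lemma fold_noskip (xs : List Int) (g : Int) :
    (List.range xs.length).foldl (fun g k => gcdI g (xs.getD k 0)) g
      = List.foldl gcdI g xs := by
  induction xs generalizing g with
  | nil => simp
  | cons x xs ih =>
    simp only [List.length_cons, List.range_succ_eq_map, List.foldl_cons, List.foldl_map,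
      List.getD_cons_zero, List.getD_cons_succ]
    exact ih (gcdI g x)

lemma fold_skip (xs : List Int) (i : Nat) (g : Int) :
    (List.range xs.length).foldl
        (fun g k => if i = k then g else gcdI g (xs.getD k 0)) g
      = List.foldl gcdI g (xs.eraseIdx i) := by
  induction xs generalizing i g with
  | nil => simp
  | cons x xs ih =>
    cases i with
    | zero =>
      simp only [List.length_cons, List.range_succ_eq_map, List.foldl_cons, List.foldl_map,
        List.getD_cons_succ, List.eraseIdx_cons_zero]
      simpa using fold_noskip xs g
    | succ j =>
      simp only [List.length_cons, List.range_succ_eq_map, List.foldl_cons, List.foldl_map,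
        List.getD_cons_succ, List.eraseIdx_cons_succ, Nat.succ_ne_zero]
      simpa using ih j (gcdI g x)

lemma sufGcds_cons (x : Int) (xs : List Int) :
    sufGcds (x :: xs) = gcdI ((sufGcds xs).headD 0) x :: sufGcds xs := rfl

lemma sufGcds_head (xs : List Int) : (sufGcds xs).headD 0 = R xs := by
  induction xs with
  | nil => simp [sufGcds, R]
  | cons x xs ih => simp only [sufGcds_cons, List.headD_cons, ih, R]

lemma sufGcds_eq_cons (xs : List Int) : sufGcds xs = R xs :: (sufGcds xs).tail := by
  cases xs with
  | nil => simp [sufGcds, R]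
  | cons x xs => rw [sufGcds_cons]; rw [sufGcds_head]; simp [R, gcdI_comm]

lemma sufGcds_getD (xs : List Int) (j : Nat) :
    (sufGcds xs).getD j 0 = R (xs.drop j) := by
  induction xs generalizing j with
  | nil => cases j <;> simp [sufGcds, R]
  | cons x xs ih =>
    cases j with
    | zero => rw [sufGcds_cons, sufGcds_head]; simp [R, gcdI_comm]
    | succ k => rw [sufGcds_cons]; simpa using ih k

-- B's backward fill builds exactly sufGcds of the first n elements
lemma suf_build (nums : List Int) (n : Int) (hn : 0 ≤ n) (hlen : n ≤ (nums.length : Int)) :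
    ∀ k : Nat, k ≤ n.toNat →
      (PySem.List.pyRange ((k : Int) - 1) (-1) (-1)).foldl
          (fun acc j => gcdI (acc.headD 0) (PySem.List.pyGetD nums j 0) :: acc)
          (sufGcds ((nums.take n.toNat).drop k))
        = sufGcds (nums.take n.toNat) := by
  intro k
  induction k with
  | zero =>
    intro _
    rw [PySem.List.pyRange_neg_one_eq_nil (by omega)]
    simp
  | succ k ih =>
    intro hk
    have hcons : PySem.List.pyRange ((k : Int) + 1 - 1) (-1) (-1)
        = (k : Int) :: PySem.List.pyRange ((k : Int) - 1) (-1) (-1) := by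
      have := PySem.List.pyRange_neg_one_cons (a := (k : Int)) (b := (-1)) (by omega)
      simpa using this
    rw [show ((k + 1 : Nat) : Int) - 1 = (k : Int) + 1 - 1 by push_cast; ring, hcons,
      List.foldl_cons]
    have hklt : k < (nums.take n.toNat).length := by
      rw [List.length_take]; omega
    have hdrop : (nums.take n.toNat).drop k
        = (nums.take n.toNat)[k] :: (nums.take n.toNat).drop (k + 1) :=
      (List.getElem_cons_drop hklt).symm
    have hget : PySem.List.pyGetD nums (k : Int) 0 = (nums.take n.toNat)[k] := by
      rw [PySem.List.pyGetD_natCast, List.getD_eq_getElem?_getD,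
        ← List.getElem?_take_of_lt (show k < n.toNat by omega)]
      simp [List.getElem?_eq_getElem hklt]
    rw [sufGcds_head, hget]
    have hstep : gcdI (R ((nums.take n.toNat).drop (k + 1))) (nums.take n.toNat)[k]
          :: sufGcds ((nums.take n.toNat).drop (k + 1))
        = sufGcds ((nums.take n.toNat).drop k) := by
      rw [hdrop, sufGcds_cons, sufGcds_head]
    rw [hstep]
    exact ih (by omega)

-- the altLoop abstraction of B's scan, walking the prefix list and the suffix-gcd tail together
def altLoop (p : Int) : Int → List Int → List Int → Bool
  | pre, x :: xs, s :: ss => if gcdI pre s == p then true else altLoop p (gcdI pre x) xs ss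
  | _, _, _ => false

lemma altScan_eq_altLoop (nums : List Int) (n p : Int) (hn : 0 ≤ n)
    (hlen : n ≤ (nums.length : Int)) :
    ∀ (k : Nat) (i : Nat) (pre : Int), i + k = n.toNat →
      altScan nums (sufGcds (nums.take n.toNat)) p pre (PySem.List.pyRange (i : Int) n 1)
        = altLoop p pre ((nums.take n.toNat).drop i)
            (sufGcds ((nums.take n.toNat).drop i)).tail := by
  intro k
  induction k with
  | zero =>
    intro i pre hi
    rw [PySem.List.pyRange_one_eq_nil (by omega)]
    rw [List.drop_eq_nil_of_le (by rw [List.length_take]; omega)]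
    simp [altScan, altLoop, sufGcds]
  | succ k ih =>
    intro i pre hi
    have hcons : PySem.List.pyRange (i : Int) n 1
        = (i : Int) :: PySem.List.pyRange ((i : Int) + 1) n 1 :=
      PySem.List.pyRange_one_cons (by omega)
    rw [hcons]
    have hklt : i < (nums.take n.toNat).length := by rw [List.length_take]; omega
    have hdrop : (nums.take n.toNat).drop i
        = (nums.take n.toNat)[i] :: (nums.take n.toNat).drop (i + 1) :=
      (List.getElem_cons_drop hklt).symm
    have hsufgetD : PySem.List.pyGetD (sufGcds (nums.take n.toNat)) ((i : Int) + 1) 0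
        = R ((nums.take n.toNat).drop (i + 1)) := by
      rw [show (i : Int) + 1 = ((i + 1 : Nat) : Int) by push_cast; ring,
        PySem.List.pyGetD_natCast, sufGcds_getD]
    have hget : PySem.List.pyGetD nums (i : Int) 0 = (nums.take n.toNat)[i] := by
      rw [PySem.List.pyGetD_natCast, List.getD_eq_getElem?_getD,
        ← List.getElem?_take_of_lt (show i < n.toNat by omega)]
      simp [List.getElem?_eq_getElem hklt]
    rw [hdrop, show (sufGcds ((nums.take n.toNat)[i] :: (nums.take n.toNat).drop (i + 1))).tail
          = sufGcds ((nums.take n.toNat).drop (i + 1)) from by rw [sufGcds_cons, List.tail_cons],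
      sufGcds_eq_cons ((nums.take n.toNat).drop (i + 1))]
    show (if gcdI pre (PySem.List.pyGetD (sufGcds (nums.take n.toNat)) ((i : Int) + 1) 0) == p
          then true
          else altScan nums (sufGcds (nums.take n.toNat)) p
            (gcdI pre (PySem.List.pyGetD nums (i : Int) 0)) (PySem.List.pyRange ((i : Int) + 1) n 1))
        = (if gcdI pre (R ((nums.take n.toNat).drop (i + 1))) == p then true
          else altLoop p (gcdI pre (nums.take n.toNat)[i]) ((nums.take n.toNat).drop (i + 1))
            (sufGcds ((nums.take n.toNat).drop (i + 1))).tail)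
    rw [hsufgetD, hget]
    cases h : (gcdI pre (R ((nums.take n.toNat).drop (i + 1))) == p) with
    | true => simp [h]
    | false =>
      simp only [h, Bool.false_eq_true, if_false]
      have hrec := ih (i + 1) (gcdI pre (nums.take n.toNat)[i]) (by omega)
      rw [show ((i + 1 : Nat) : Int) = (i : Int) + 1 by push_cast; ring] at hrec
      exact hrec

lemma altLoop_spec (p : Int) (xs : List Int) (pre : Int) :
    altLoop p pre xs (sufGcds xs).tail
      = (List.range xs.length).any
          (fun i => gcdI (List.foldl gcdI pre (xs.take i)) (R (xs.drop (i + 1))) == p) := by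
  induction xs generalizing pre with
  | nil => simp [altLoop]
  | cons x xs ih =>
    have h1 : (sufGcds (x :: xs)).tail = sufGcds xs := by simp [sufGcds_cons]
    rw [h1, sufGcds_eq_cons xs]
    show (if gcdI pre (R xs) == p then true
          else altLoop p (gcdI pre x) xs (sufGcds xs).tail) = _
    rw [ih (gcdI pre x)]
    simp only [List.length_cons, List.range_succ_eq_map, List.any_cons, List.any_map]
    cases h : (gcdI pre (R xs) == p) with
    | true => simp [h]
    | false => simp [h, Function.comp_def, List.take_succ_cons]

-- A, under Pre_ and 0 < n, as an any over Nat indices of gcd-of-erase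
lemma A_eq (nums : List Int) (n p : Int) (hn : 0 ≤ n) (hlen : n ≤ (nums.length : Int)) :
    can_drop_one nums n p
      = (List.range n.toNat).any
          (fun i => (List.foldl gcdI 0 ((nums.take n.toNat).eraseIdx i)) == p) := by
  unfold can_drop_one
  rw [PySem.List.pyRange_one, List.any_map]
  rw [show ((n - 0).toNat) = n.toNat by simp]
  apply List.any_congr rfl
  intro i
  simp only [Function.comp_apply]
  rw [List.foldl_map]
  congr 1
  have hl : (nums.take n.toNat).length = n.toNat := by rw [List.length_take]; omega
  refine Eq.trans
    (PySem.List.foldl_congr_mem _ _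
      (fun g k => if i = k then g else gcdI g ((nums.take n.toNat).getD k 0)) 0 ?_) ?_
  · intro a k hk
    have hk' : k < n.toNat := List.mem_range.mp hk
    have hkl : k < nums.length := by omega
    have hget : PySem.List.pyGetD nums ((0 : Int) + (k : Int)) 0
        = (nums.take n.toNat).getD k 0 := by
      rw [zero_add, PySem.List.pyGetD_natCast, List.getD_eq_getElem?_getD,
        List.getD_eq_getElem?_getD, List.getElem?_take_of_lt hk']
    rw [hget]
    by_cases hik : i = k <;> simp [hik]
  · have h := fold_skip (nums.take n.toNat) i 0
    rwa [hl] at h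

-- ===== VERDICT (by name: the statement is the Claim_ definition above) =====
theorem can_drop_one_spec : Claim_equal_can_drop_one := by
  intro nums n p _ hpre
  unfold Spec_can_drop_one can_drop_one_alt
  by_cases hn : n ≤ 0
  · rw [PySem.List.pyRange_one_eq_nil (by omega)]
    unfold can_drop_one
    rw [PySem.List.pyRange_one_eq_nil (by omega)]
    rfl
  · have hn' : 0 ≤ n := by omega
    have hpre' : n ≤ (nums.length : Int) := hpre
    have hsuf := suf_build nums n hn' hpre' n.toNat le_rfl
    rw [List.drop_eq_nil_of_le (by rw [List.length_take]; omega)] at hsuf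
    simp only []
    rw [show (n - 1 : Int) = ((n.toNat : Int) - 1) by omega] at *
    rw [show sufGcds [] = [0] from rfl] at hsuf
    rw [hsuf]
    rw [show (0 : Int) = ((0 : Nat) : Int) from rfl,
      altScan_eq_altLoop nums n p hn' hpre' n.toNat 0 (((0 : Nat)) : Int) (by omega)]
    rw [List.drop_zero, altLoop_spec, A_eq nums n p hn' hpre']
    rw [show (List.take n.toNat nums).length = n.toNat by rw [List.length_take]; omega]
    apply List.any_congr rfl
    intro i
    rw [List.eraseIdx_eq_take_drop_succ, List.foldl_append]
    rw [foldl_gcdI_eq_R _ _ (foldl_gcdI_nonneg _ _ le_rfl)]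
    norm_num
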